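-- pv_equiv track=rewrite | github.com/hsteinhaus/venus-os_dbus-serialbattery | test/jkbms_pb_fc03_verify.py | regs_to_ascii
-- ===== SOURCE A (Python) =====
-- def regs_to_ascii(regs):
--     chars = []
--     for r in regs:
--         hi, lo = (r >> 8) & 0xFF, r & 0xFF
--         if 32 <= hi < 127:
--             chars.append(chr(hi))
--         if 32 <= lo < 127:
--             chars.append(chr(lo))
--     return "".join(chars).rstrip("\x00 ")
-- ===== SOURCE B (Python) =====
-- def regs_to_ascii(regs):
--     # Single reverse pass: walk registers back-to-front (low byte before high byte),
--     # skip trailing strippable output until the first kept char, then keep every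
--     # printable char; finally reverse the accumulator. This fuses rstrip("\x00 ")
--     # into the construction (NUL is never printable, so only spaces get stripped).
--     out = []
--     started = False
--     for r in reversed(regs):
--         for b in (r & 0xFF, (r >> 8) & 0xFF):
--             if 32 <= b < 127:
--                 if started or b != 32:
--                     out.append(chr(b))
--                     started = True
--     return "".join(reversed(out))
-- ===== Notes on version B (the rewrite author's own statement) =====
-- stated objective: alternative
-- what changed: Replaced A's forward filter-then-rstrip by a single reverse pass: registers are walked back-to-front (low byte before high byte) with a 'started' flag that fuses the rstrip into construction by skipping trailing strippable chars, and the accumulator is reversed once at the end; no separate rstrip step exists.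
import Mathlib
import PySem

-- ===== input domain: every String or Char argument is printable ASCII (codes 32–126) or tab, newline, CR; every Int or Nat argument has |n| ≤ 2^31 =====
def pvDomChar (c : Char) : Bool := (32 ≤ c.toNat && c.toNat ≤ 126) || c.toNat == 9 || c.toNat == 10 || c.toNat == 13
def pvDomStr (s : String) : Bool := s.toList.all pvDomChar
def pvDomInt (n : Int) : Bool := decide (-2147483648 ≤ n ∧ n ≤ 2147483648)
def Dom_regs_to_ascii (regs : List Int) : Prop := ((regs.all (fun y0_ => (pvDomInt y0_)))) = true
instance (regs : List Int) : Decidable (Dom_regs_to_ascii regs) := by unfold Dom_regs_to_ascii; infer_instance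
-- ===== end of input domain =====

-- B replaces A's forward filter-then-rstrip by a single reverse pass (registers back-to-front,
-- low byte before high byte) that fuses the rstrip into construction via a 'started' flag;
-- same cost, alternative decomposition.

-- exact port of str.rstrip("\x00 ") : drop trailing NUL and space characters (used by port A)
def pyRstripNulSpace (cs : List Char) : List Char :=
  (cs.reverse.dropWhile (fun c => c == '\x00' || c == ' ')).reverse

-- ===== PORT A =====
def regs_to_ascii (regs : List Int) : String :=
  let chars := regs.foldl (fun (chars : List Char) (r : Int) =>
    let hi : Int := PySem.Int.band (r >>> (8 : Nat)) 255
    let lo : Int := PySem.Int.band r 255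
    let chars := if 32 ≤ hi ∧ hi < 127 then chars ++ [Char.ofNat hi.toNat] else chars
    if 32 ≤ lo ∧ lo < 127 then chars ++ [Char.ofNat lo.toNat] else chars) []
  String.ofList (pyRstripNulSpace chars)

-- ===== PORT B =====
-- one byte of Source B's inner loop: skip non-printables; before the first kept char also skip spaces
def bStep (st : List Char × Bool) (b : Int) : List Char × Bool :=
  if 32 ≤ b ∧ b < 127 then
    if st.2 = true ∨ b ≠ 32 then (st.1 ++ [Char.ofNat b.toNat], true) else st
  else st

def regs_to_ascii_alt (regs : List Int) : String :=
  let st := regs.reverse.foldl (fun st r =>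
    bStep (bStep st (PySem.Int.band r 255)) (PySem.Int.band (r >>> (8 : Nat)) 255)) ([], false)
  String.ofList st.1.reverse

-- ===== PRECONDITION & SPEC =====
def Spec_regs_to_ascii (regs : List Int) (out : String) : Prop := out = regs_to_ascii_alt regs
instance (regs : List Int) (out : String) : Decidable (Spec_regs_to_ascii regs out) := by unfold Spec_regs_to_ascii; infer_instance

-- ===== CLAIM (what is proved, stated in full; the proofs are below) =====
def Claim_equal_regs_to_ascii : Prop := ∀ (regs : List Int), Dom_regs_to_ascii regs → Spec_regs_to_ascii regs (regs_to_ascii regs)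

-- ===== LEMMAS AND PROOFS =====

-- A's loop body, rewritten as "extend by a per-register chunk"
theorem aChars_eq_flatMap (regs : List Int) :
    regs.foldl (fun (chars : List Char) (r : Int) =>
      let hi : Int := PySem.Int.band (r >>> (8 : Nat)) 255
      let lo : Int := PySem.Int.band r 255
      let chars := if 32 ≤ hi ∧ hi < 127 then chars ++ [Char.ofNat hi.toNat] else chars
      if 32 ≤ lo ∧ lo < 127 then chars ++ [Char.ofNat lo.toNat] else chars) [] =
    regs.flatMap (fun (r : Int) =>
      (([PySem.Int.band (r >>> (8 : Nat)) 255, PySem.Int.band r 255].filter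
          (fun c => 32 ≤ c ∧ c < 127)).map (fun c => Char.ofNat c.toNat))) := by
  have h := PySem.List.foldl_append_eq_flatMap
    (l := regs) (acc := ([] : List Char))
    (g := fun (r : Int) =>
      (([PySem.Int.band (r >>> (8 : Nat)) 255, PySem.Int.band r 255].filter
          (fun c => 32 ≤ c ∧ c < 127)).map (fun c => Char.ofNat c.toNat)))
  simp only [List.nil_append] at h
  rw [← h]
  apply PySem.List.foldl_congr_mem
  intro acc r _
  simp only [List.filter]
  by_cases h1 : (32 : Int) ≤ PySem.Int.band (r >>> (8 : Nat)) 255 ∧ PySem.Int.band (r >>> (8 : Nat)) 255 < 127 <;>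
    by_cases h2 : (32 : Int) ≤ PySem.Int.band r 255 ∧ PySem.Int.band r 255 < 127 <;>
      simp [h1, h2]

-- B's register loop = folding bStep over the (reversed) byte stream
theorem bFold_eq_byteFold (l : List Int) (st : List Char × Bool) :
    l.foldl (fun st r =>
      bStep (bStep st (PySem.Int.band r 255)) (PySem.Int.band (r >>> (8 : Nat)) 255)) st =
    (l.flatMap (fun (r : Int) => [PySem.Int.band r 255, PySem.Int.band (r >>> (8 : Nat)) 255])).foldl bStep st := by
  induction l generalizing st with
  | nil => rfl
  | cons r t ih => simp [List.foldl, ih]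

-- once started, bStep just appends every printable char
theorem byteFold_true (L : List Int) (acc : List Char) :
    L.foldl bStep (acc, true) =
      (acc ++ (L.filter (fun b => decide (32 ≤ b ∧ b < 127))).map (fun b => Char.ofNat b.toNat), true) := by
  induction L generalizing acc with
  | nil => simp
  | cons b t ih =>
    by_cases hp : (32 : Int) ≤ b ∧ b < 127 <;> simp [bStep, hp, ih]

-- before the first kept char, leading printable spaces are skipped
theorem byteFold_false (L : List Int) (acc : List Char) :
    (L.foldl bStep (acc, false)).1 =
      acc ++ (((L.filter (fun b => decide (32 ≤ b ∧ b < 127))).dropWhile (fun b => b == 32)).map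
        (fun b => Char.ofNat b.toNat)) := by
  induction L generalizing acc with
  | nil => simp
  | cons b t ih =>
    by_cases hp : (32 : Int) ≤ b ∧ b < 127
    · by_cases h32 : b = 32
      · subst h32
        simp [bStep, hp, ih]
      · simp [bStep, hp, h32, byteFold_true]
    · simp [bStep, hp, ih]

-- for printable non-space byte values, chr b is neither NUL nor space
theorem chr_not_strippable (n : Nat) (h1 : 32 ≤ n) (h2 : n < 127) (h3 : n ≠ 32) :
    ((Char.ofNat n == '\x00') || (Char.ofNat n == ' ')) = false := by
  interval_cases n <;> simp_all

-- on a list of printable chars, rstrip's dropWhile is dropping the value-32 bytes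
theorem dropWhile_map_chr (M : List Int) (hM : ∀ b ∈ M, (32 : Int) ≤ b ∧ b < 127) :
    (M.map (fun b => Char.ofNat b.toNat)).dropWhile (fun c => c == '\x00' || c == ' ') =
      (M.dropWhile (fun b => b == 32)).map (fun b => Char.ofNat b.toNat) := by
  induction M with
  | nil => rfl
  | cons b t ih =>
    have hb := hM b (List.mem_cons_self ..)
    have ht : ∀ x ∈ t, (32 : Int) ≤ x ∧ x < 127 := fun x hx => hM x (List.mem_cons_of_mem _ hx)
    by_cases h32 : b = 32
    · subst h32
      simp [List.dropWhile, ih ht]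
    · have hq := chr_not_strippable b.toNat (by omega) (by omega) (by omega)
      have hb32 : (b == 32) = false := by simpa using h32
      simp [List.dropWhile, hq, hb32]

-- ===== VERDICT (by name: the statement is the Claim_ definition above) =====
theorem regs_to_ascii_spec : Claim_equal_regs_to_ascii := by
  intro regs _
  unfold Spec_regs_to_ascii regs_to_ascii regs_to_ascii_alt
  rw [aChars_eq_flatMap, bFold_eq_byteFold]
  simp only [byteFold_false, List.nil_append]
  have hbytes : regs.reverse.flatMap (fun (r : Int) => [PySem.Int.band r 255, PySem.Int.band (r >>> (8 : Nat)) 255]) =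
      (regs.flatMap (fun (r : Int) => [PySem.Int.band (r >>> (8 : Nat)) 255, PySem.Int.band r 255])).reverse := by
    rw [List.reverse_flatMap]; rfl
  have hA : regs.flatMap (fun (r : Int) =>
      (([PySem.Int.band (r >>> (8 : Nat)) 255, PySem.Int.band r 255].filter
          (fun c => 32 ≤ c ∧ c < 127)).map (fun c => Char.ofNat c.toNat))) =
      ((regs.flatMap (fun (r : Int) => [PySem.Int.band (r >>> (8 : Nat)) 255, PySem.Int.band r 255])).filter
          (fun c => 32 ≤ c ∧ c < 127)).map (fun c => Char.ofNat c.toNat) := by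
    simp [List.filter_flatMap, List.map_flatMap]
  rw [hA, hbytes]
  unfold pyRstripNulSpace
  rw [← List.map_reverse, ← List.filter_reverse]
  rw [dropWhile_map_chr]
  intro b hb
  have := List.of_mem_filter hb
  simpa using this
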